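-- pv_equiv track=rewrite | github.com/PrathameshBagal/Data-Structures-and-Algorithms | Recursion/sayDigits.py | sayDigits
-- ===== SOURCE A (Python) =====
-- def sayDigits(num,ans,map):
--     if num==0:
--         return []
--
--     dig=num%10
--     num=num//10
--
--     ans=sayDigits(num,ans,map)
--     ans.append(map[dig])
--     return ans
-- ===== SOURCE B (Python) =====
-- def sayDigits(num, ans, map):
--     # iterative: collect digit words least-significant first, reverse at the end
--     words = []
--     while num != 0:
--         words.append(map[num % 10])
--         num //= 10
--     return list(reversed(words))
-- ===== Notes on version B (the rewrite author's own statement) =====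
-- stated objective: alternative
-- what changed: Replaces the recursive digit peel (recurse on num//10, then append map[num%10] after the call returns) by an explicit while-loop that collects the words least-significant-first into a list and reverses it once at the end; ans is untouched in both.
import Mathlib
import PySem

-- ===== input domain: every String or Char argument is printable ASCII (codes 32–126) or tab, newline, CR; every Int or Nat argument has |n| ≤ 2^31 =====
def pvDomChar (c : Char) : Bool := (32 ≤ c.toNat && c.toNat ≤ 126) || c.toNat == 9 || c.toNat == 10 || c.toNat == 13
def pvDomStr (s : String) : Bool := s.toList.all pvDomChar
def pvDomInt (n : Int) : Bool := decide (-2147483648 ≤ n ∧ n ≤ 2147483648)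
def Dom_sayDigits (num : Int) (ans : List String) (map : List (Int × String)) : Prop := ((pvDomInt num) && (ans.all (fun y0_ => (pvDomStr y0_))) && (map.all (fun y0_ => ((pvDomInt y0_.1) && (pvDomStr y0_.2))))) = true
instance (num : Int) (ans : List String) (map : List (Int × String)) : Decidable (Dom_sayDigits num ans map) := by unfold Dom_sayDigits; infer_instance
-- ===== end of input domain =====

-- B replaces A's recursion on num//10 by an explicit loop collecting digit words
-- least-significant-first and one final reversal; ans is unused by both.


-- ===== PORT A =====
-- recursive peel: recurse on num // 10, then append map[num % 10].
-- Python diverges (RecursionError) for num < 0; that branch returns [] here and is outside Pre_.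
def sayDigits (num : Int) (ans : List String) (map : List (Int × String)) : List String :=
  if num = 0 then []
  else if num < 0 then []
  else
    sayDigits (PySem.Int.floordiv num 10) ans map
      ++ [(PySem.Dict.mk map).getD (PySem.Int.mod num 10) ""]
termination_by num.toNat
decreasing_by
  rename_i h0 hneg
  have : PySem.Int.floordiv num 10 = num / 10 := PySem.Int.floordiv_eq_ediv_of_pos (by omega)
  rw [this]; omega

-- ===== PORT B =====
-- loop: words.append(map[num % 10]); num //= 10;  reverse at the end.
-- Python loops forever for num < 0; that branch stops here and is outside Pre_.
def sayDigitsLoop (num : Int) (words : List String) (map : PySem.Dict Int String) : List String :=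
  if num = 0 then words
  else if num < 0 then words
  else
    sayDigitsLoop (PySem.Int.floordiv num 10)
      (words ++ [map.getD (PySem.Int.mod num 10) ""]) map
termination_by num.toNat
decreasing_by
  rename_i h0 hneg
  have : PySem.Int.floordiv num 10 = num / 10 := PySem.Int.floordiv_eq_ediv_of_pos (by omega)
  rw [this]; omega

def sayDigits_alt (num : Int) (ans : List String) (map : List (Int × String)) : List String :=
  (sayDigitsLoop num [] (PySem.Dict.mk map)).reverse

-- ===== PRECONDITION & SPEC =====
-- Pre_ excludes num < 0 (A hits RecursionError, B's loop never ends) and, for num > 0,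
-- any num with a decimal digit missing from map's keys (A raises KeyError there).
def Pre_sayDigits (num : Int) (ans : List String) (map : List (Int × String)) : Prop :=
  0 ≤ num ∧ ∀ d ∈ Nat.digits 10 num.toNat, (PySem.Dict.mk map).contains (d : Int) = true
instance (num : Int) (ans : List String) (map : List (Int × String)) : Decidable (Pre_sayDigits num ans map) := by unfold Pre_sayDigits; infer_instance

def pvWitness_sayDigits : Int × List String × (List (Int × String)) :=
  (123, [], [(1, "one"), (2, "two"), (3, "three")])

def Spec_sayDigits (num : Int) (ans : List String) (map : List (Int × String)) (out : List String) : Prop := out = sayDigits_alt num ans map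
instance (num : Int) (ans : List String) (map : List (Int × String)) (out : List String) : Decidable (Spec_sayDigits num ans map out) := by unfold Spec_sayDigits; infer_instance

-- ===== CLAIM (what is proved, stated in full; the proofs are below) =====
def Claim_equal_sayDigits : Prop := ∀ (num : Int) (ans : List String) (map : List (Int × String)), Dom_sayDigits num ans map → Pre_sayDigits num ans map → Spec_sayDigits num ans map (sayDigits num ans map)

-- ===== LEMMAS AND PROOFS =====
-- loop invariant: for 0 ≤ num the loop appends exactly the reverse of A's result
lemma sayDigitsLoop_eq (n : Nat) : ∀ (num : Int), num.toNat = n → 0 ≤ num →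
    ∀ (words ans : List String) (map : List (Int × String)),
    sayDigitsLoop num words (PySem.Dict.mk map)
      = words ++ (sayDigits num ans map).reverse := by
  induction n using Nat.strong_induction_on with
  | _ n ih =>
    intro num hn hnn words ans map
    by_cases h0 : num = 0
    · rw [sayDigitsLoop, sayDigits]; simp [h0]
    · have hpos : 0 < num := lt_of_le_of_ne hnn (Ne.symm h0)
      have hdiv : PySem.Int.floordiv num 10 = num / 10 :=
        PySem.Int.floordiv_eq_ediv_of_pos (by omega)
      rw [sayDigitsLoop, sayDigits]
      simp only [h0, if_false, if_neg (not_lt.mpr hnn)]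
      rw [hdiv, ih (num / 10).toNat (by omega) (num / 10) rfl (by omega) _ ans map]
      simp

theorem sayDigits_eq_alt (num : Int) (ans : List String) (map : List (Int × String))
    (h : 0 ≤ num) : sayDigits num ans map = sayDigits_alt num ans map := by
  unfold sayDigits_alt
  rw [sayDigitsLoop_eq num.toNat num rfl h [] ans map]
  simp

-- ===== VERDICT (by name: the statement is the Claim_ definition above) =====
theorem sayDigits_spec : Claim_equal_sayDigits := by
  intro num ans map _ hpre
  exact (sayDigits_eq_alt num ans map hpre.1).symm ▸ rfl
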